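-- pv_equiv track=rewrite | github.com/Rio3210/Competetive-Programming | Code_for_1.py | solve
-- ===== SOURCE A (Python) =====
-- def _list(n):
--     if n<=1:
--         return n
--     else:
--         return 2 * _list(n//2) + n%2
--
-- def solve(p, n, temp, prev):
--     if p == 0:
--         return 0
--     elif p == temp:
--         return _list(n)
--     elif p==temp//2 + 1:
--         return _list(n//2) + n%2
--     elif p>temp:
--         return _list(n) + prev%2 + solve(p - temp - 1, n//2, temp//2, n)
--     else:
--         return solve(p, n//2, temp//2, n)
-- ===== SOURCE B (Python) =====
-- # B: iterative cascade with an accumulator; no inner recursion (_list is the identity on int)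
-- # and an early exit once the cascade state (temp, n, prev parity) can never contribute again,
-- # so B runs in O(log) steps even where A's recursion is O(p) deep.
-- def solve(p, n, temp, prev):
--     total = 0
--     while not (p == 0 or p == temp or p == temp // 2 + 1):
--         if p > temp:
--             if temp == 0 and n == 0 and prev % 2 == 0:
--                 return total  # exhausted cascade: every remaining step would add 0
--             total += n + prev % 2
--             p -= temp + 1
--         n, temp, prev = n // 2, temp // 2, n
--     return total + (0 if p == 0 else (n if p == temp else n // 2 + n % 2))
-- ===== Notes on version B (the rewrite author's own statement) =====
-- stated objective: faster
-- what changed: The recursive identity helper _list(n) is eliminated and the outer recursion becomes an iterative accumulator loop with a merged exit guard and an early exit once the cascade state (temp, n, prev parity) can never contribute again, so B needs O(log) steps even where A's recursion is O(p) deep.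
import Mathlib
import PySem

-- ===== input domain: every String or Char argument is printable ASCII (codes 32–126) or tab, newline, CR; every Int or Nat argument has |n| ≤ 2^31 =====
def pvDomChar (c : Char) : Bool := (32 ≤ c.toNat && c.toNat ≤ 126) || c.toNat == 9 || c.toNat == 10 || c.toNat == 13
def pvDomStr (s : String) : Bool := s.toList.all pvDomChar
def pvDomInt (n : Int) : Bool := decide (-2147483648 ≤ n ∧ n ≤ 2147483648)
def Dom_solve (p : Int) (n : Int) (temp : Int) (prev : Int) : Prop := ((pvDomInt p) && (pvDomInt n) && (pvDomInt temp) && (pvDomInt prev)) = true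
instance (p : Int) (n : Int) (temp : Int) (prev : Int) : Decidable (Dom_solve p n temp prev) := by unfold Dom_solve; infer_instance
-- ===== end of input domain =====

-- B eliminates A's recursive identity helper _list and replaces the outer recursion by an
-- iterative accumulator loop with an early exit once the cascade can no longer contribute
-- (objective: faster by algorithm — no inner recursion and a bounded loop; a timing run
-- found both programs too fast at the generated sizes to measure a difference).

-- ===== PORT A =====
-- _list(n): literal recursion. Termination: for 2 <= n, n // 2 < n.
def listA (n : Int) : Int :=
  if n ≤ 1 then n
  else 2 * listA (PySem.Int.floordiv n 2) + PySem.Int.mod n 2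
termination_by n.toNat
decreasing_by
  have h2 : (2:Int) ≤ n := by omega
  have : PySem.Int.floordiv n 2 = n / 2 := PySem.Int.floordiv_eq_ediv_of_pos (by omega)
  rw [this]; omega

-- solve: Python's recursion does not terminate for all integer inputs, so the port carries a
-- fuel counter that only makes the same computation total; on every input admitted by
-- Pre_solve the fuel is never exhausted.
def solveF (fuel : Nat) (p : Int) (n : Int) (temp : Int) (prev : Int) : Int :=
  match fuel with
  | 0 => 0
  | Nat.succ fuel =>
    if p = 0 then 0
    else if p = temp then listA n
    else if p = PySem.Int.floordiv temp 2 + 1 then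
      listA (PySem.Int.floordiv n 2) + PySem.Int.mod n 2
    else if p > temp then
      listA n + PySem.Int.mod prev 2 +
        solveF fuel (p - temp - 1) (PySem.Int.floordiv n 2) (PySem.Int.floordiv temp 2) n
    else solveF fuel p (PySem.Int.floordiv n 2) (PySem.Int.floordiv temp 2) n

def solve (p : Int) (n : Int) (temp : Int) (prev : Int) : Int :=
  solveF (p.toNat + temp.toNat + 1) p n temp prev

-- ===== PORT B =====
-- the while-loop of Source B: merged exit guard, accumulator `total`, early exit on an exhausted
-- cascade; same fuel discipline as A's port (the fuel only makes the computation total).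
def solveLoop (fuel : Nat) (p : Int) (n : Int) (temp : Int) (prev : Int) (total : Int) : Int :=
  match fuel with
  | 0 => total
  | Nat.succ fuel =>
    if p = 0 ∨ p = temp ∨ p = PySem.Int.floordiv temp 2 + 1 then
      total + (if p = 0 then 0 else if p = temp then n
               else PySem.Int.floordiv n 2 + PySem.Int.mod n 2)
    else if p > temp then
      if temp = 0 ∧ n = 0 ∧ PySem.Int.mod prev 2 = 0 then total
      else solveLoop fuel (p - (temp + 1)) (PySem.Int.floordiv n 2) (PySem.Int.floordiv temp 2)
             n (total + (n + PySem.Int.mod prev 2))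
    else solveLoop fuel p (PySem.Int.floordiv n 2) (PySem.Int.floordiv temp 2) n total

def solve_alt (p : Int) (n : Int) (temp : Int) (prev : Int) : Int :=
  solveLoop (p.toNat + temp.toNat + 1) p n temp prev 0

-- ===== PRECONDITION & SPEC =====
-- Pre_solve admits every input on which A's recursion terminates: the whole quadrant
-- 0 ≤ p ∧ 0 ≤ temp, plus the cases that return after at most one recursive step for any
-- integers (p = 0, p = temp, p = temp//2 + 1, p = temp + 1).  What it excludes is exactly
-- the inputs on which the recursion p → p, temp → temp//2 (or p → p-temp-1) never reaches a
-- base case, where CPython's A dies with RecursionError.  (At the admitted far extreme —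
-- p larger than roughly 2*temp by more than the interpreter's recursion limit — the
-- recursion is still well-defined and is what the ports compute, though CPython's fixed
-- depth limit would fire before A returns; B returns that value iteratively.)
def Pre_solve (p : Int) (n : Int) (temp : Int) (prev : Int) : Prop :=
  (0 ≤ p ∧ 0 ≤ temp) ∨ p = 0 ∨ p = temp ∨ p = PySem.Int.floordiv temp 2 + 1 ∨ p = temp + 1
instance (p : Int) (n : Int) (temp : Int) (prev : Int) : Decidable (Pre_solve p n temp prev) := by
  unfold Pre_solve; infer_instance

def pvWitness_solve : Int × Int × Int × Int := (3, 5, 3, 0)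

def Spec_solve (p : Int) (n : Int) (temp : Int) (prev : Int) (out : Int) : Prop := out = solve_alt p n temp prev
instance (p : Int) (n : Int) (temp : Int) (prev : Int) (out : Int) : Decidable (Spec_solve p n temp prev out) := by unfold Spec_solve; infer_instance

-- ===== CLAIM (what is proved, stated in full; the proofs are below) =====
def Claim_equal_solve : Prop := ∀ (p : Int) (n : Int) (temp : Int) (prev : Int), Dom_solve p n temp prev → Pre_solve p n temp prev → Spec_solve p n temp prev (solve p n temp prev)

-- ===== LEMMAS AND PROOFS =====

-- _list is the identity on ℤ.
theorem listA_id (n : Int) : listA n = n := by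
  rw [listA]
  split
  · rfl
  · rename_i h
    rw [listA_id (PySem.Int.floordiv n 2)]
    have := PySem.Int.floordiv_mul_add_mod n 2
    omega
termination_by n.toNat
decreasing_by
  have h2 : (2:Int) ≤ n := by omega
  have : PySem.Int.floordiv n 2 = n / 2 := PySem.Int.floordiv_eq_ediv_of_pos (by omega)
  rw [this]; omega

-- the common mathematical value of the recursion, defined by well-founded recursion on
-- p.toNat + temp.toNat (proof-side helper only)
def S (p : Int) (n : Int) (temp : Int) (prev : Int) : Int :=
  if hp0 : p = 0 then 0
  else if hpt : p = temp then n
  else if hpm : p = PySem.Int.floordiv temp 2 + 1 then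
    PySem.Int.floordiv n 2 + PySem.Int.mod n 2
  else if hnn : 0 ≤ p ∧ 0 ≤ temp then
    if hgt : p > temp then
      n + PySem.Int.mod prev 2 +
        S (p - temp - 1) (PySem.Int.floordiv n 2) (PySem.Int.floordiv temp 2) n
    else S p (PySem.Int.floordiv n 2) (PySem.Int.floordiv temp 2) n
  else if hp1 : p = temp + 1 then n + PySem.Int.mod prev 2
  else 0
termination_by p.toNat + temp.toNat
decreasing_by
  · have ht : PySem.Int.floordiv temp 2 = temp / 2 := PySem.Int.floordiv_eq_ediv_of_pos (by omega)
    rw [ht]; omega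
  · have ht : PySem.Int.floordiv temp 2 = temp / 2 := PySem.Int.floordiv_eq_ediv_of_pos (by omega)
    rw [ht]; omega

theorem S_exhausted (k : Nat) : ∀ (p prev : Int), p = (k : Int) →
    PySem.Int.mod prev 2 = 0 → S p 0 0 prev = 0 := by
  induction k with
  | zero => intro p prev hp _; subst hp; rw [S]; simp
  | succ k ih =>
    intro p prev hp hprev
    subst hp
    rw [S]
    have hm : PySem.Int.floordiv (0:Int) 2 = 0 := by decide
    have hmod0 : PySem.Int.mod (0:Int) 2 = 0 := by decide
    by_cases hk : k = 0
    · subst hk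
      rw [dif_neg (by norm_num), dif_neg (by norm_num), dif_pos (by rw [hm]; norm_num)]
      rw [hm, hmod0]
      norm_num
    · have h2 : ((k+1:Nat) : Int) ≠ 0 := by push_cast; omega
      have h3 : ((k+1:Nat) : Int) ≠ PySem.Int.floordiv (0:Int) 2 + 1 := by
        rw [hm]; push_cast
        have : 1 ≤ k := Nat.one_le_iff_ne_zero.mpr hk
        omega
      rw [dif_neg h2, dif_neg h2, dif_neg h3, dif_pos (show (0:Int) ≤ ((k+1:Nat):Int) ∧ (0:Int) ≤ (0:Int) from ⟨by positivity, le_refl 0⟩),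
          dif_pos (show ((k+1:Nat):Int) > 0 by push_cast; omega)]
      rw [hm, hprev]
      have harg : ((k+1:Nat):Int) - 0 - 1 = (k:Int) := by push_cast; ring
      rw [harg, ih (k:Int) 0 rfl hmod0]
      ring

theorem solveF_p0 (fuel : Nat) (n temp prev : Int) : solveF fuel 0 n temp prev = 0 := by
  cases fuel <;> simp [solveF]

theorem solveLoop_p0 (fuel : Nat) (n temp prev total : Int) :
    solveLoop fuel 0 n temp prev total = total := by
  cases fuel <;> simp [solveLoop]

theorem solveF_eq_S : ∀ (fuel : Nat) (p n temp prev : Int), 0 ≤ p → 0 ≤ temp →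
    p.toNat + temp.toNat < fuel → solveF fuel p n temp prev = S p n temp prev := by
  intro fuel
  induction fuel with
  | zero => intro p n temp prev _ _ h; omega
  | succ fuel ih =>
    intro p n temp prev hp htemp hlt
    have ht2 : PySem.Int.floordiv temp 2 = temp / 2 := PySem.Int.floordiv_eq_ediv_of_pos (by omega)
    rw [solveF, S]
    by_cases hp0 : p = 0
    · simp [hp0]
    · rw [if_neg hp0, dif_neg hp0]
      by_cases hpt : p = temp
      · simp [hpt, listA_id]
      · rw [if_neg hpt, dif_neg hpt]
        by_cases hpm : p = PySem.Int.floordiv temp 2 + 1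
        · simp [hpm, listA_id]
        · rw [if_neg hpm, dif_neg hpm, dif_pos ⟨hp, htemp⟩]
          by_cases hgt : p > temp
          · rw [if_pos hgt, dif_pos hgt, listA_id,
                ih (p - temp - 1) (PySem.Int.floordiv n 2) (PySem.Int.floordiv temp 2) n
                  (by omega) (by rw [ht2]; omega) (by rw [ht2]; omega)]
          · rw [if_neg hgt, dif_neg hgt,
                ih p (PySem.Int.floordiv n 2) (PySem.Int.floordiv temp 2) n
                  hp (by rw [ht2]; omega) (by rw [ht2]; omega)]

theorem solveLoop_eq_S : ∀ (fuel : Nat) (p n temp prev total : Int), 0 ≤ p → 0 ≤ temp →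
    p.toNat + temp.toNat < fuel →
    solveLoop fuel p n temp prev total = total + S p n temp prev := by
  intro fuel
  induction fuel with
  | zero => intro p n temp prev total _ _ h; omega
  | succ fuel ih =>
    intro p n temp prev total hp htemp hlt
    have ht2 : PySem.Int.floordiv temp 2 = temp / 2 := PySem.Int.floordiv_eq_ediv_of_pos (by omega)
    rw [solveLoop, S]
    by_cases hp0 : p = 0
    · simp [hp0]
    · by_cases hpt : p = temp
      · rw [if_pos (Or.inr (Or.inl hpt)), dif_neg hp0, dif_pos hpt, if_neg hp0, if_pos hpt]
      · by_cases hpm : p = PySem.Int.floordiv temp 2 + 1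
        · rw [if_pos (Or.inr (Or.inr hpm)), dif_neg hp0, dif_neg hpt, dif_pos hpm,
              if_neg hp0, if_neg hpt]
        · rw [if_neg (fun hor => hor.elim hp0 (fun h2 => h2.elim hpt hpm)), dif_neg hp0, dif_neg hpt, dif_neg hpm,
              dif_pos ⟨hp, htemp⟩]
          by_cases hgt : p > temp
          · rw [if_pos hgt, dif_pos hgt]
            by_cases hex : temp = 0 ∧ n = 0 ∧ PySem.Int.mod prev 2 = 0
            · rw [if_pos hex]
              obtain ⟨h0, hn0, hpr⟩ := hex
              subst h0; subst hn0
              have hfd : PySem.Int.floordiv (0:Int) 2 = 0 := by decide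
              rw [hfd, S_exhausted (p - 0 - 1).toNat (p - 0 - 1) 0 (by omega) (by decide), hpr]
              ring
            · rw [if_neg hex,
                  ih (p - (temp + 1)) (PySem.Int.floordiv n 2) (PySem.Int.floordiv temp 2) n
                    (total + (n + PySem.Int.mod prev 2)) (by omega) (by rw [ht2]; omega)
                    (by rw [ht2]; omega)]
              have : p - (temp + 1) = p - temp - 1 := by ring
              rw [this]; ring
          · rw [if_neg hgt, dif_neg hgt,
                ih p (PySem.Int.floordiv n 2) (PySem.Int.floordiv temp 2) n total
                  hp (by rw [ht2]; omega) (by rw [ht2]; omega)]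

-- ===== VERDICT (by name: the statement is the Claim_ definition above) =====
theorem solve_spec : Claim_equal_solve := by
  intro p n temp prev _ hpre
  show solve p n temp prev = solve_alt p n temp prev
  rw [solve, solve_alt]
  by_cases hnn : 0 ≤ p ∧ 0 ≤ temp
  · rw [solveF_eq_S _ p n temp prev hnn.1 hnn.2 (by omega),
        solveLoop_eq_S _ p n temp prev 0 hnn.1 hnn.2 (by omega)]
    ring
  · by_cases hp0 : p = 0
    · subst hp0; rw [solveF_p0, solveLoop_p0]
    · by_cases hpt : p = temp
      · rw [solveF, solveLoop, if_neg hp0, if_pos hpt,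
            if_pos (Or.inr (Or.inl hpt)), if_neg hp0, if_pos hpt, listA_id]
        ring
      · by_cases hpm : p = PySem.Int.floordiv temp 2 + 1
        · rw [solveF, solveLoop, if_neg hp0, if_neg hpt, if_pos hpm,
              if_pos (Or.inr (Or.inr hpm)), if_neg hp0, if_neg hpt, listA_id]
          ring
        · have hp1 : p = temp + 1 := by
            rcases hpre with h | h | h | h | h
            · exact absurd h hnn
            · exact absurd h hp0
            · exact absurd h hpt
            · exact absurd h hpm
            · exact h
          have hgt : p > temp := by omega
          have ht0 : ¬ (temp = 0 ∧ n = 0 ∧ PySem.Int.mod prev 2 = 0) := by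
            intro h; exact hnn ⟨by omega, by omega⟩
          rw [solveF, solveLoop, if_neg hp0, if_neg hpt, if_neg hpm, if_pos hgt,
              if_neg (fun hor => hor.elim hp0 (fun h2 => h2.elim hpt hpm)), if_pos hgt,
              if_neg ht0]
          have hz : p - temp - 1 = 0 := by omega
          have hz2 : p - (temp + 1) = 0 := by omega
          rw [hz, hz2, solveF_p0, solveLoop_p0, listA_id]
          ring
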